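-- pv_equiv track=rewrite | github.com/Roronoah-sudo/nihongo-quest | ui/dialog_box.py | _parse
-- ===== SOURCE A (Python) =====
-- def _parse(raw):
--     """
--     Parse raw text into segments.
--     Returns list of (base_text, furigana_or_None).
--     """
--     segments = []
--     i = 0
--     while i < len(raw):
--         if raw[i] == '{':
--             end = raw.find('}', i)
--             if end == -1:
--                 segments.append((raw[i:], None))
--                 break
--             inner = raw[i + 1:end]
--             if '|' in inner:
--                 base, reading = inner.split('|', 1)
--                 segments.append((base, reading))
--             else:
--                 segments.append((inner, None))
--             i = end + 1
--         else:
--             # Collect plain text until next '{'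
--             j = raw.find('{', i)
--             if j == -1:
--                 segments.append((raw[i:], None))
--                 break
--             segments.append((raw[i:j], None))
--             i = j
--     return segments
-- ===== SOURCE B (Python) =====
-- def _parse(raw):
--     """
--     Parse raw text into segments.
--     Returns list of (base_text, furigana_or_None).
--     Single left-to-right scanner with an in_brace flag and a buffer.
--     """
--     segments = []
--     buf = []
--     in_brace = False
--     for ch in raw:
--         if in_brace:
--             if ch == '}':
--                 inner = ''.join(buf)
--                 if '|' in inner:
--                     base, reading = inner.split('|', 1)
--                     segments.append((base, reading))
--                 else:
--                     segments.append((inner, None))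
--                 buf = []
--                 in_brace = False
--             else:
--                 buf.append(ch)
--         else:
--             if ch == '{':
--                 if buf:
--                     segments.append((''.join(buf), None))
--                 buf = []
--                 in_brace = True
--             else:
--                 buf.append(ch)
--     if in_brace:
--         segments.append(('{' + ''.join(buf), None))
--     elif buf:
--         segments.append((''.join(buf), None))
--     return segments
-- ===== Notes on version B (the rewrite author's own statement) =====
-- stated objective: alternative
-- what changed: Replaced A's index loop that jumps with raw.find and slices out segments by a single character-by-character scanner with an in_brace flag and a buffer that is flushed at '{', '}' and end of string.
import Mathlib
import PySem

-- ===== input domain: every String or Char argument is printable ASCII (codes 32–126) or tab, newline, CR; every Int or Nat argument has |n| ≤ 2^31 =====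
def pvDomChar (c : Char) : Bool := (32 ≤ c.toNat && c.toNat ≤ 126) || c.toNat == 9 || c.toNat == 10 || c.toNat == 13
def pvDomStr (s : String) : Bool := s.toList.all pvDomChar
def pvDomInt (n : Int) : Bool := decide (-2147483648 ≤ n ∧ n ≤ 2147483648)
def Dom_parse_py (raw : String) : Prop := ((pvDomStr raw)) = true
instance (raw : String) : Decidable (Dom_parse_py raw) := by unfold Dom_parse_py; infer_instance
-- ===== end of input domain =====

-- B replaces A's index-jumping find/slice loop by a single character-by-character
-- scanner with an in_brace flag and a buffer (objective: alternative decomposition).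


-- ===== PORT A =====
-- relative port of raw.find(ch, i): index of first occurrence of x in the suffix
def findCh (x : Char) : List Char → Option Nat
  | [] => none
  | c :: t => if c = x then some 0 else (findCh x t).map (· + 1)

-- shared port of the identical 3-line snippet in both Pythons:
-- "if '|' in inner: base, reading = inner.split('|', 1); append (base, reading) else append (inner, None)"
def emitSeg (inner : List Char) : String × Option String :=
  match findCh '|' inner with
  | none => (String.mk inner, none)
  | some k => (String.mk (inner.take k), some (String.mk (inner.drop (k + 1))))

-- termination helper for parseA: a find that did not match at the head is ≥ 1
theorem findCh_cons_pos {x c : Char} {t : List Char} {j : Nat}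
    (hc : ¬ c = x) (h : findCh x (c :: t) = some j) : 1 ≤ j := by
  simp [findCh, hc] at h
  obtain ⟨k, _, hk⟩ := h
  omega

-- A's while-loop, as recursion on the suffix raw[i:]
def parseA (s : List Char) : List (String × Option String) :=
  match s with
  | [] => []
  | c :: t =>
    if hc : c = '{' then
      match findCh '}' (c :: t) with
      | none => [(String.mk (c :: t), none)]
      | some e => emitSeg (((c :: t).take e).drop 1) :: parseA ((c :: t).drop (e + 1))
    else
      match hj : findCh '{' (c :: t) with
      | none => [(String.mk (c :: t), none)]
      | some j => (String.mk ((c :: t).take j), none) :: parseA ((c :: t).drop j)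
termination_by s.length
decreasing_by
  · simp only [List.length_drop, List.length_cons]; omega
  · have := findCh_cons_pos hc hj
    simp only [List.length_drop, List.length_cons]; omega

def parse_py (raw : String) : List (String × Option String) := parseA raw.toList

-- ===== PORT B =====
-- scanner state: (segments, buffer, in_brace)
def stepB (st : List (String × Option String) × List Char × Bool) (ch : Char) :
    List (String × Option String) × List Char × Bool :=
  match st with
  | (segs, buf, true) =>
      if ch = '}' then (segs ++ [emitSeg buf], [], false) else (segs, buf ++ [ch], true)
  | (segs, buf, false) =>
      if ch = '{' then ((if buf = [] then segs else segs ++ [(String.mk buf, none)]), [], true)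
      else (segs, buf ++ [ch], false)

-- the post-loop flush
def finishB (st : List (String × Option String) × List Char × Bool) :
    List (String × Option String) :=
  match st with
  | (segs, buf, true) => segs ++ [(String.mk ('{' :: buf), none)]
  | (segs, buf, false) => if buf = [] then segs else segs ++ [(String.mk buf, none)]

def parse_py_alt (raw : String) : List (String × Option String) :=
  finishB (raw.toList.foldl stepB ([], [], false))

-- ===== PRECONDITION & SPEC =====
def Spec_parse_py (raw : String) (out : List (String × Option String)) : Prop := out = parse_py_alt raw
instance (raw : String) (out : List (String × Option String)) : Decidable (Spec_parse_py raw out) := by unfold Spec_parse_py; infer_instance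

-- ===== CLAIM (what is proved, stated in full; the proofs are below) =====
def Claim_equal_parse_py : Prop := ∀ (raw : String), Dom_parse_py raw → Spec_parse_py raw (parse_py raw)

-- ===== LEMMAS AND PROOFS =====

theorem findCh_drop {x : Char} : ∀ {s : List Char} {j : Nat},
    findCh x s = some j → s.drop j = x :: s.drop (j + 1) := by
  intro s
  induction s with
  | nil => intro j h; simp [findCh] at h
  | cons c t ih =>
    intro j h
    by_cases hc : c = x
    · simp [findCh, hc] at h
      subst h hc
      simp
    · simp [findCh, hc] at h
      obtain ⟨k, hk, rfl⟩ := h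
      simpa using ih hk

-- the plain-mode run of B's loop, up to the next '{'
theorem foldl_false : ∀ (s : List Char) (segs : List (String × Option String)) (buf : List Char),
    s.foldl stepB (segs, buf, false) =
      match findCh '{' s with
      | none => (segs, buf ++ s, false)
      | some j => (s.drop (j + 1)).foldl stepB
          ((if buf ++ s.take j = [] then segs else segs ++ [(String.mk (buf ++ s.take j), none)]),
           [], true) := by
  intro s
  induction s with
  | nil => intro segs buf; simp [findCh]
  | cons c t ih =>
    intro segs buf
    by_cases hc : c = '{'
    · subst hc
      simp [findCh, List.foldl_cons, stepB]
    · have h1 : (c :: t).foldl stepB (segs, buf, false) = t.foldl stepB (segs, buf ++ [c], false) := by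
        simp [List.foldl_cons, stepB, hc]
      rw [h1, ih]
      simp [findCh, hc]
      cases h : findCh '{' t with
      | none => simp
      | some k => simp

-- the brace-mode run of B's loop, up to the closing '}'
theorem foldl_true : ∀ (s : List Char) (segs : List (String × Option String)) (buf : List Char),
    s.foldl stepB (segs, buf, true) =
      match findCh '}' s with
      | none => (segs, buf ++ s, true)
      | some e => (s.drop (e + 1)).foldl stepB (segs ++ [emitSeg (buf ++ s.take e)], [], false) := by
  intro s
  induction s with
  | nil => intro segs buf; simp [findCh]
  | cons c t ih =>
    intro segs buf
    by_cases hc : c = '}'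
    · subst hc
      simp [findCh, List.foldl_cons, stepB]
    · have h1 : (c :: t).foldl stepB (segs, buf, true) = t.foldl stepB (segs, buf ++ [c], true) := by
        simp [List.foldl_cons, stepB, hc]
      rw [h1, ih]
      simp [findCh, hc]
      cases h : findCh '}' t with
      | none => simp
      | some k => simp

-- one-step unfoldings of parseA
theorem parseA_plain_none {c : Char} {t : List Char} (hc : ¬ c = '{')
    (hj : findCh '{' (c :: t) = none) : parseA (c :: t) = [(String.mk (c :: t), none)] := by
  rw [parseA]
  simp only [hc, dif_neg, not_false_iff]
  split
  · rfl
  · next j heq => rw [heq] at hj; cases hj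

theorem parseA_plain_some {c : Char} {t : List Char} {j : Nat} (hc : ¬ c = '{')
    (hj : findCh '{' (c :: t) = some j) :
    parseA (c :: t) = (String.mk ((c :: t).take j), none) :: parseA ((c :: t).drop j) := by
  rw [parseA]
  simp only [hc, dif_neg, not_false_iff]
  split
  · next heq => rw [heq] at hj; cases hj
  · next j' heq => rw [heq] at hj; cases hj; rfl

theorem parseA_brace_none {s : List Char} (he : findCh '}' ('{' :: s) = none) :
    parseA ('{' :: s) = [(String.mk ('{' :: s), none)] := by
  rw [parseA]
  simp [he]

theorem parseA_brace_some {s : List Char} {e : Nat} (he : findCh '}' ('{' :: s) = some e) :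
    parseA ('{' :: s) =
      emitSeg ((('{' :: s).take e).drop 1) :: parseA (('{' :: s).drop (e + 1)) := by
  rw [parseA]
  simp [he]

theorem main_lemma : ∀ (n : Nat) (s : List Char), s.length ≤ n →
    (∀ segs, finishB (s.foldl stepB (segs, [], false)) = segs ++ parseA s) ∧
    (∀ segs, finishB (s.foldl stepB (segs, [], true)) = segs ++ parseA ('{' :: s)) := by
  intro n
  induction n with
  | zero =>
    intro s hs
    have : s = [] := List.eq_nil_of_length_eq_zero (Nat.le_zero.mp hs)
    subst this
    constructor
    · intro segs; simp [finishB, parseA]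
    · intro segs
      rw [parseA_brace_none (by simp [findCh])]
      simp [finishB]
  | succ n ih =>
    intro s hs
    constructor
    · -- plain mode
      intro segs
      match s with
      | [] => simp [finishB, parseA]
      | c :: t =>
        by_cases hc : c = '{'
        · subst hc
          have h1 : ('{' :: t).foldl stepB (segs, [], false) = t.foldl stepB (segs, [], true) := by
            simp [List.foldl_cons, stepB]
          rw [h1]
          exact (ih t (by simp at hs; omega)).2 segs
        · rw [foldl_false]
          cases hj : findCh '{' (c :: t) with
          | none =>
            rw [parseA_plain_none hc hj]
            simp [finishB]
          | some j =>
            have hj1 : 1 ≤ j := findCh_cons_pos hc hj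
            have htk : (c :: t).take j ≠ [] := by
              cases j with
              | zero => omega
              | succ k => simp
            simp only [List.nil_append, if_neg htk]
            have hdrop : (c :: t).drop j = '{' :: (c :: t).drop (j + 1) := findCh_drop hj
            have hlen : ((c :: t).drop (j + 1)).length ≤ n := by
              simp at hs ⊢; omega
            rw [(ih _ hlen).2, ← hdrop, parseA_plain_some hc hj]
            simp
    · -- brace mode
      intro segs
      rw [foldl_true]
      cases he : findCh '}' s with
      | none =>
        rw [parseA_brace_none (by simp [findCh, he])]
        simp [finishB]
      | some e =>
        have h2 : findCh '}' ('{' :: s) = some (e + 1) := by simp [findCh, he]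
        have hlen : (s.drop (e + 1)).length ≤ n := by
          cases s with
          | nil => simp [findCh] at he
          | cons c t => simp at hs ⊢; omega
        rw [(ih _ hlen).1, parseA_brace_some h2]
        simp

-- ===== VERDICT (by name: the statement is the Claim_ definition above) =====
theorem parse_py_spec : Claim_equal_parse_py := by
  intro raw _
  unfold Spec_parse_py parse_py parse_py_alt
  have h := (main_lemma raw.toList.length raw.toList le_rfl).1 []
  simp [h]
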